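-- pv_equiv track=rewrite | github.com/jyotirmoy208/MSMALatest | MSMVMCA/msmaclusteringseed.py | find_best_db_sorted_dict
-- ===== SOURCE A (Python) =====
-- def find_best_db_sorted_dict(previous_dict,current_dict):
--     new_dict={}
--     for itr in range(len(previous_dict)):
--         prev_max=min(previous_dict)
--         current_max=min(current_dict)
--         if prev_max<current_max:
--             new_dict[prev_max]=previous_dict[prev_max]
--             previous_dict.pop(prev_max)
--         else:
--             new_dict[current_max] = current_dict[current_max]
--             current_dict.pop(current_max)
--     return new_dict
-- ===== SOURCE B (Python) =====
-- def find_best_db_sorted_dict(previous_dict, current_dict):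
--     n = len(previous_dict)
--     prev_keys = sorted(previous_dict)
--     cur_keys = sorted(current_dict)
--     i = j = 0
--     new_dict = {}
--     for _ in range(n):
--         if j < len(cur_keys) and (i >= len(prev_keys) or cur_keys[j] <= prev_keys[i]):
--             k = cur_keys[j]
--             new_dict[k] = current_dict[k]
--             j += 1
--         else:
--             k = prev_keys[i]
--             new_dict[k] = previous_dict[k]
--             i += 1
--     return new_dict
-- ===== Notes on version B (the rewrite author's own statement) =====
-- stated objective: faster
-- what changed: Instead of re-scanning both whole dicts with min() and popping on every iteration, B sorts the two key lists once and merges them with two index pointers for N steps (ties go to current_dict, as in A); B does not mutate its arguments, while A pops entries from both input dicts.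
-- outside the precondition, e.g. on find_best_db_sorted_dict({1: 10}, {}): A raises ValueError, B returns {1: 10}
-- crash fix: When previous_dict is non-empty and current_dict runs out of keys before the N merge steps finish (in particular when current_dict is empty), A raises ValueError from min() on an empty dict; B simply keeps taking the remaining smallest previous_dict keys and returns the merged dict. — e.g. on find_best_db_sorted_dict([(1, 10)], []): A raises ValueError, B returns [(1, 10)]
import Mathlib
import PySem

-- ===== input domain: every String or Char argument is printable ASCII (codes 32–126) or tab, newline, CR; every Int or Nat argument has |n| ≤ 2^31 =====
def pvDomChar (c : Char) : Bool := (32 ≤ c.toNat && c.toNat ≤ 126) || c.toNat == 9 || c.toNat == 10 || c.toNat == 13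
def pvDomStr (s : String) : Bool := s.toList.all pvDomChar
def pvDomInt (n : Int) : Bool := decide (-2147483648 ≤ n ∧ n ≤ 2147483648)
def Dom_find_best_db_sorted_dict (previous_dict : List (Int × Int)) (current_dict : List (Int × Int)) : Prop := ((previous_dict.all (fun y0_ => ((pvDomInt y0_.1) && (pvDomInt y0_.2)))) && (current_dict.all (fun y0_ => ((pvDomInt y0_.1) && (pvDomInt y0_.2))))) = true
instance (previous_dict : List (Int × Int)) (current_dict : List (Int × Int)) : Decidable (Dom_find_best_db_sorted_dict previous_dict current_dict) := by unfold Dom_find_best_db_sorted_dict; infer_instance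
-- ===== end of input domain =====

-- B replaces A's per-iteration min()-scan-and-pop over both dicts by sorting the two key
-- lists once and merging them with two index pointers (objective: faster, asymptotic).
-- NOTE: Python A mutates both argument dicts (pop); B does not — the equivalence proved
-- here is about the RETURN value only.

-- ===== PORT A =====
def find_best_db_sorted_dict (previous_dict : List (Int × Int)) (current_dict : List (Int × Int)) : List (Int × Int) :=
  let st := (List.range previous_dict.length).foldl
    (fun (st : PySem.Dict Int Int × PySem.Dict Int Int × PySem.Dict Int Int) _ =>
      let (new_dict, prev, cur) := st
      -- prev_max = min(previous_dict); current_max = min(current_dict): min over a dict's keys;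
      -- 'none' is where Python raises ValueError (outside Pre_), the state is then returned unchanged
      match PySem.List.min? prev.keys (fun k => k), PySem.List.min? cur.keys (fun k => k) with
      | some prev_max, some current_max =>
        if prev_max < current_max then
          (new_dict.insert prev_max (prev.getD prev_max 0), prev.erase prev_max, cur)
        else
          (new_dict.insert current_max (cur.getD current_max 0), prev, cur.erase current_max)
      | _, _ => st)
    (PySem.Dict.empty, PySem.Dict.mk previous_dict, PySem.Dict.mk current_dict)
  st.1.items

-- ===== PORT B =====
def find_best_db_sorted_dict_alt (previous_dict : List (Int × Int)) (current_dict : List (Int × Int)) : List (Int × Int) :=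
  let prev_keys := PySem.List.sorted (PySem.Dict.keys (PySem.Dict.mk previous_dict)) (fun k => k) false
  let cur_keys := PySem.List.sorted (PySem.Dict.keys (PySem.Dict.mk current_dict)) (fun k => k) false
  let st := (List.range previous_dict.length).foldl
    (fun (st : PySem.Dict Int Int × Nat × Nat) _ =>
      let (new_dict, i, j) := st
      if j < cur_keys.length ∧ (prev_keys.length ≤ i ∨ cur_keys.getD j 0 ≤ prev_keys.getD i 0) then
        let k := cur_keys.getD j 0
        (new_dict.insert k ((PySem.Dict.mk current_dict).getD k 0), i, j + 1)
      else
        let k := prev_keys.getD i 0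
        (new_dict.insert k ((PySem.Dict.mk previous_dict).getD k 0), i + 1, j))
    (PySem.Dict.empty, 0, 0)
  st.1.items

-- ===== PRECONDITION & SPEC =====
-- Pre_ excludes (a) association lists with duplicate keys in either argument — those encode no
-- Python dict (the Python function receives dicts, whose keys are unique) — and (b) exactly the
-- inputs on which A raises ValueError: previous_dict non-empty while current_dict runs out of
-- keys before the len(previous_dict) merge steps finish (min() of an empty dict).
def Pre_find_best_db_sorted_dict (previous_dict : List (Int × Int)) (current_dict : List (Int × Int)) : Prop :=
  (previous_dict.map Prod.fst).Nodup ∧ (current_dict.map Prod.fst).Nodup ∧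
  (previous_dict = [] ∨
    (current_dict ≠ [] ∧
      previous_dict.length ≤ current_dict.length +
        (previous_dict.map Prod.fst).countP
          (fun p => decide (p < (current_dict.map Prod.fst).foldl max ((current_dict.map Prod.fst).getD 0 0)))))
instance (previous_dict : List (Int × Int)) (current_dict : List (Int × Int)) : Decidable (Pre_find_best_db_sorted_dict previous_dict current_dict) := by unfold Pre_find_best_db_sorted_dict; infer_instance

def pvWitness_find_best_db_sorted_dict : (List (Int × Int)) × (List (Int × Int)) := ([(1, 10), (3, 30)], [(2, 20), (4, 40)])

-- When previous_dict is non-empty and current_dict runs out of keys before the N merge steps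
-- finish (in particular when current_dict is empty), A raises ValueError from min() on an empty
-- dict; B keeps taking the remaining smallest previous_dict keys and returns the merged dict.
def Raises_find_best_db_sorted_dict (previous_dict : List (Int × Int)) (current_dict : List (Int × Int)) : Prop :=
  (previous_dict.map Prod.fst).Nodup ∧ (current_dict.map Prod.fst).Nodup ∧
  previous_dict ≠ [] ∧
  ¬ (current_dict ≠ [] ∧
      previous_dict.length ≤ current_dict.length +
        (previous_dict.map Prod.fst).countP
          (fun p => decide (p < (current_dict.map Prod.fst).foldl max ((current_dict.map Prod.fst).getD 0 0))))
instance (previous_dict : List (Int × Int)) (current_dict : List (Int × Int)) : Decidable (Raises_find_best_db_sorted_dict previous_dict current_dict) := by unfold Raises_find_best_db_sorted_dict; infer_instance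

def pvRaiseWitness_find_best_db_sorted_dict : (List (Int × Int)) × (List (Int × Int)) := ([(1, 10)], [])
def pvRaiseWitnessOut_find_best_db_sorted_dict : List (Int × Int) := [(1, 10)]

def Spec_find_best_db_sorted_dict (previous_dict : List (Int × Int)) (current_dict : List (Int × Int)) (out : List (Int × Int)) : Prop := out = find_best_db_sorted_dict_alt previous_dict current_dict
instance (previous_dict : List (Int × Int)) (current_dict : List (Int × Int)) (out : List (Int × Int)) : Decidable (Spec_find_best_db_sorted_dict previous_dict current_dict out) := by unfold Spec_find_best_db_sorted_dict; infer_instance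

-- ===== CLAIM (what is proved, stated in full; the proofs are below) =====
def Claim_equal_find_best_db_sorted_dict : Prop := ∀ (previous_dict : List (Int × Int)) (current_dict : List (Int × Int)), Dom_find_best_db_sorted_dict previous_dict current_dict → Pre_find_best_db_sorted_dict previous_dict current_dict → Spec_find_best_db_sorted_dict previous_dict current_dict (find_best_db_sorted_dict previous_dict current_dict)
def Claim_raises_find_best_db_sorted_dict : Prop := (∀ (previous_dict : List (Int × Int)) (current_dict : List (Int × Int)), Dom_find_best_db_sorted_dict previous_dict current_dict → Raises_find_best_db_sorted_dict previous_dict current_dict → ¬ Pre_find_best_db_sorted_dict previous_dict current_dict) ∧ (Dom_find_best_db_sorted_dict (pvRaiseWitness_find_best_db_sorted_dict.1) (pvRaiseWitness_find_best_db_sorted_dict.2) ∧ Raises_find_best_db_sorted_dict (pvRaiseWitness_find_best_db_sorted_dict.1) (pvRaiseWitness_find_best_db_sorted_dict.2) ∧ find_best_db_sorted_dict_alt (pvRaiseWitness_find_best_db_sorted_dict.1) (pvRaiseWitness_find_best_db_sorted_dict.2) = pvRaiseWitnessOut_find_best_db_sorted_dict)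

-- ===== LEMMAS AND PROOFS =====

-- A's loop body, as a function of the loop state (new_dict, prev, cur)
def pvStepA (st : PySem.Dict Int Int × PySem.Dict Int Int × PySem.Dict Int Int) :
    PySem.Dict Int Int × PySem.Dict Int Int × PySem.Dict Int Int :=
  let (new_dict, prev, cur) := st
  match PySem.List.min? prev.keys (fun k => k), PySem.List.min? cur.keys (fun k => k) with
  | some prev_max, some current_max =>
    if prev_max < current_max then
      (new_dict.insert prev_max (prev.getD prev_max 0), prev.erase prev_max, cur)
    else
      (new_dict.insert current_max (cur.getD current_max 0), prev, cur.erase current_max)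
  | _, _ => st

-- B's loop body, as a function of the loop state (new_dict, i, j)
def pvStepB (prev_keys cur_keys : List Int) (previous_dict current_dict : List (Int × Int))
    (st : PySem.Dict Int Int × Nat × Nat) : PySem.Dict Int Int × Nat × Nat :=
  let (new_dict, i, j) := st
  if j < cur_keys.length ∧ (prev_keys.length ≤ i ∨ cur_keys.getD j 0 ≤ prev_keys.getD i 0) then
    let k := cur_keys.getD j 0
    (new_dict.insert k ((PySem.Dict.mk current_dict).getD k 0), i, j + 1)
  else
    let k := prev_keys.getD i 0
    (new_dict.insert k ((PySem.Dict.mk previous_dict).getD k 0), i + 1, j)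

-- a fold whose body ignores the list element is an iterate
theorem pvFoldlConst {α β : Type} (g : α → α) (l : List β) (init : α) :
    l.foldl (fun s _ => g s) init = g^[l.length] init := by
  induction l generalizing init with
  | nil => rfl
  | cons x t ih => simpa [Function.iterate_succ_apply] using ih (g init)

-- the first extremal element returned by min(…) is THE minimum value
theorem pvMin?_eq (l : List Int) (m : Int) (hm : m ∈ l) (hmin : ∀ x ∈ l, m ≤ x) :
    PySem.List.min? l (fun k => k) = some m := by
  cases h : PySem.List.min? l (fun k => k) with
  | none =>
    rw [PySem.List.min?_eq_none_iff] at h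
    simp [h] at hm
  | some m' =>
    have h1 := PySem.List.min?_mem h
    have h2 := PySem.List.min?_isMin h m hm
    have h3 := hmin m' h1
    exact congrArg some (le_antisymm h2 h3)

-- looking up a key that passes a key-only filter is a lookup in the unfiltered dict
theorem pvGetD_filter (l : List (Int × Int)) (p : Int → Bool) (k : Int) (hk : p k = true) (d : Int) :
    (PySem.Dict.mk (l.filter (fun kv => p kv.1))).getD k d = (PySem.Dict.mk l).getD k d := by
  induction l with
  | nil => rfl
  | cons a t ih =>
    by_cases ha : a.1 = k
    · simp [PySem.Dict.getD, PySem.Dict.get?, ha, hk]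
    · by_cases hpa : p a.1 <;>
        simpa [PySem.Dict.getD, PySem.Dict.get?, List.filter_cons, hpa, ha] using ih

-- one erase step refines a key-membership filter from drop i to drop (i+1)
theorem pvFilterStep (x K : Int) (l l' : List Int) (hl : l = K :: l') (hK : K ∉ l') :
    (!x == K && decide (x ∈ l)) = decide (x ∈ l') := by
  subst hl
  by_cases heq : x = K
  · subst heq
    rw [decide_eq_false hK]
    simp only [beq_self_eq_true, Bool.not_true, Bool.false_and]
  · rw [beq_eq_false_iff_ne.mpr heq]
    simp only [Bool.not_false, Bool.true_and]
    exact decide_eq_decide.mpr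
      ⟨fun h => (List.mem_cons.mp h).resolve_left heq, fun h => List.mem_cons_of_mem _ h⟩

-- main invariant: after i+j merged steps A's state (new_dict, remaining prev, remaining cur)
-- matches B's (new_dict, i, j), and the two loops end with the same dict
theorem pvLoop (P C : List (Int × Int)) (pk ck : List Int)
    (hplt : pk.Pairwise (· < ·)) (hclt : ck.Pairwise (· < ·))
    (hpperm : pk.Perm (P.map Prod.fst)) (hcperm : ck.Perm (C.map Prod.fst))
    (hbound : P ≠ [] → C ≠ [] ∧
      P.length ≤ C.length +
        (P.map Prod.fst).countP
          (fun p => decide (p < (C.map Prod.fst).foldl max ((C.map Prod.fst).getD 0 0)))) :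
    ∀ (k i j : Nat) (nd pd cd : PySem.Dict Int Int),
      i + j + k = P.length → i ≤ pk.length → j ≤ ck.length →
      pd.items = P.filter (fun kv => decide (kv.1 ∈ pk.drop i)) →
      cd.items = C.filter (fun kv => decide (kv.1 ∈ ck.drop j)) →
      (∀ a ∈ pk.take i, ∀ b ∈ ck.drop j, a < b) →
      (∀ b ∈ ck.take j, ∀ a ∈ pk.drop i, b ≤ a) →
      (pvStepA^[k] (nd, pd, cd)).1 = ((pvStepB pk ck P C)^[k] (nd, i, j)).1 := by
  have hpklen : pk.length = P.length := by rw [hpperm.length_eq, List.length_map]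
  have hcklen : ck.length = C.length := by rw [hcperm.length_eq, List.length_map]
  intro k
  induction k with
  | zero => intro i j nd pd cd _ _ _ _ _ _ _; rfl
  | succ k ih =>
    intro i j nd pd cd hk hi hj hpd hcd hsep1 hsep2
    have hi' : i < pk.length := by omega
    -- current_dict cannot be exhausted before the loop ends, by the Pre_ counting bound
    have hj' : j < ck.length := by
      by_contra hge
      have hjeq : j = ck.length := by omega
      have hPne : P ≠ [] := by
        intro h
        rw [h] at hk; simp at hk
      obtain ⟨hCne, hcnt⟩ := hbound hPne
      have hclne : C.map Prod.fst ≠ [] := by simpa using hCne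
      obtain ⟨c, t, hct⟩ := List.exists_cons_of_ne_nil hclne
      set M := (C.map Prod.fst).foldl max ((C.map Prod.fst).getD 0 0) with hM
      have hMfold : M = t.foldl max c := by
        rw [hM, hct]; simp [List.foldl_cons]
      have hMmem : M ∈ ck := by
        apply hcperm.mem_iff.mpr
        rw [hct]
        rcases PySem.List.foldl_max_mem t c with h | h
        · rw [hMfold, h]; exact List.mem_cons_self
        · rw [hMfold]; exact List.mem_cons_of_mem _ h
      have hMtake : M ∈ ck.take j := by rwa [hjeq, List.take_length]
      have hdrop0 : ∀ a ∈ pk.drop i, ¬ (a < M) := by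
        intro a ha
        exact not_lt.mpr (hsep2 M hMtake a ha)
      have hcntP : (P.map Prod.fst).countP (fun p => decide (p < M)) ≤ i := by
        rw [← hpperm.countP_eq, ← List.take_append_drop i pk, List.countP_append]
        have h1 : (pk.take i).countP (fun p => decide (p < M)) ≤ i := by
          calc (pk.take i).countP (fun p => decide (p < M)) ≤ (pk.take i).length :=
                List.countP_le_length
            _ ≤ i := by rw [List.length_take]; omega
        have h2 : (pk.drop i).countP (fun p => decide (p < M)) = 0 := by
          rw [List.countP_eq_zero]
          intro a ha
          simpa using hdrop0 a ha
        omega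
      omega
    have hdropP : pk.drop i = pk[i] :: pk.drop (i + 1) := List.drop_eq_getElem_cons hi'
    have hdropC : ck.drop j = ck[j] :: ck.drop (j + 1) := List.drop_eq_getElem_cons hj'
    have hpdlt : (pk.drop i).Pairwise (· < ·) := hplt.sublist (List.drop_sublist i pk)
    have hcdlt : (ck.drop j).Pairwise (· < ·) := hclt.sublist (List.drop_sublist j ck)
    have hpmin : ∀ b ∈ pk.drop i, pk[i] ≤ b := by
      intro b hb
      rw [hdropP] at hb hpdlt
      rcases List.mem_cons.mp hb with rfl | hb
      · exact le_refl _
      · exact le_of_lt ((List.pairwise_cons.mp hpdlt).1 b hb)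
    have hcmin : ∀ b ∈ ck.drop j, ck[j] ≤ b := by
      intro b hb
      rw [hdropC] at hb hcdlt
      rcases List.mem_cons.mp hb with rfl | hb
      · exact le_refl _
      · exact le_of_lt ((List.pairwise_cons.mp hcdlt).1 b hb)
    have hpnotmem : pk[i] ∉ pk.drop (i + 1) := by
      rw [hdropP] at hpdlt
      intro hmem
      exact lt_irrefl _ ((List.pairwise_cons.mp hpdlt).1 _ hmem)
    have hcnotmem : ck[j] ∉ ck.drop (j + 1) := by
      rw [hdropC] at hcdlt
      intro hmem
      exact lt_irrefl _ ((List.pairwise_cons.mp hcdlt).1 _ hmem)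
    have hpdkeys : pd.keys = (P.map Prod.fst).filter (fun x => decide (x ∈ pk.drop i)) := by
      show pd.items.map (fun x => x.1) = _
      rw [hpd, List.filter_map]
      rfl
    have hcdkeys : cd.keys = (C.map Prod.fst).filter (fun x => decide (x ∈ ck.drop j)) := by
      show cd.items.map (fun x => x.1) = _
      rw [hcd, List.filter_map]
      rfl
    have hminP : PySem.List.min? pd.keys (fun k => k) = some pk[i] := by
      apply pvMin?_eq
      · rw [hpdkeys, List.mem_filter]
        refine ⟨hpperm.mem_iff.mp (pk.getElem_mem hi'), by simp only [decide_eq_true_eq, hdropP, List.mem_cons]; exact Or.inl trivial⟩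
      · intro x hx
        rw [hpdkeys, List.mem_filter] at hx
        exact hpmin x (by simpa using hx.2)
    have hminC : PySem.List.min? cd.keys (fun k => k) = some ck[j] := by
      apply pvMin?_eq
      · rw [hcdkeys, List.mem_filter]
        refine ⟨hcperm.mem_iff.mp (ck.getElem_mem hj'), by simp only [decide_eq_true_eq, hdropC, List.mem_cons]; exact Or.inl trivial⟩
      · intro x hx
        rw [hcdkeys, List.mem_filter] at hx
        exact hcmin x (by simpa using hx.2)
    have hpdmk : pd = PySem.Dict.mk (P.filter (fun kv => decide (kv.1 ∈ pk.drop i))) :=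
      PySem.Dict.ext hpd
    have hcdmk : cd = PySem.Dict.mk (C.filter (fun kv => decide (kv.1 ∈ ck.drop j))) :=
      PySem.Dict.ext hcd
    have hvalP : pd.getD pk[i] 0 = (PySem.Dict.mk P).getD pk[i] 0 := by
      rw [hpdmk]
      exact pvGetD_filter P (fun x => decide (x ∈ pk.drop i)) pk[i] (by simp only [decide_eq_true_eq, hdropP, List.mem_cons]; exact Or.inl trivial) 0
    have hvalC : cd.getD ck[j] 0 = (PySem.Dict.mk C).getD ck[j] 0 := by
      rw [hcdmk]
      exact pvGetD_filter C (fun x => decide (x ∈ ck.drop j)) ck[j] (by simp only [decide_eq_true_eq, hdropC, List.mem_cons]; exact Or.inl trivial) 0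
    have hA : pvStepA (nd, pd, cd) =
        if pk[i] < ck[j] then
          (nd.insert pk[i] (pd.getD pk[i] 0), pd.erase pk[i], cd)
        else
          (nd.insert ck[j] (cd.getD ck[j] 0), pd, cd.erase ck[j]) := by
      simp only [pvStepA]
      rw [hminP, hminC]
    have hB : pvStepB pk ck P C (nd, i, j) =
        if ck[j] ≤ pk[i] then
          (nd.insert ck[j] ((PySem.Dict.mk C).getD ck[j] 0), i, j + 1)
        else
          (nd.insert pk[i] ((PySem.Dict.mk P).getD pk[i] 0), i + 1, j) := by
      simp only [pvStepB]
      rw [List.getD_eq_getElem ck 0 hj', List.getD_eq_getElem pk 0 hi']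
      by_cases hle : ck[j] ≤ pk[i]
      · rw [if_pos ⟨hj', Or.inr hle⟩, if_pos hle]
      · have hcond : ¬(j < ck.length ∧ (pk.length ≤ i ∨ ck[j] ≤ pk[i])) := by
          rintro ⟨-, h | h⟩
          · omega
          · exact hle h
        rw [if_neg hcond, if_neg hle]
    rw [Function.iterate_succ_apply, Function.iterate_succ_apply, hA, hB]
    by_cases hlt : pk[i] < ck[j]
    · rw [if_pos hlt, if_neg (by omega), hvalP]
      apply ih (i + 1) j _ _ cd (by omega) (by omega) (by omega)
      · show (pd.erase pk[i]).items = _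
        show (pd.items.filter (fun p => !(p.1 == pk[i]))) = _
        rw [hpd, List.filter_filter]
        apply List.filter_congr
        intro kv _
        exact pvFilterStep kv.1 pk[i] (pk.drop i) (pk.drop (i + 1)) hdropP hpnotmem
      · exact hcd
      · intro a ha b hb
        rw [List.take_add_one, List.getElem?_eq_getElem hi'] at ha
        simp only [List.mem_append, Option.toList_some, List.mem_singleton] at ha
        rcases ha with ha | rfl
        · exact hsep1 a ha b hb
        · exact lt_of_lt_of_le hlt (hcmin b hb)
      · intro b hb a ha
        exact hsep2 b hb a (by rw [hdropP]; exact List.mem_cons_of_mem _ ha)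
    · rw [if_neg hlt, if_pos (by omega), hvalC]
      apply ih i (j + 1) _ pd _ (by omega) (by omega) (by omega)
      · exact hpd
      · show (cd.erase ck[j]).items = _
        show (cd.items.filter (fun p => !(p.1 == ck[j]))) = _
        rw [hcd, List.filter_filter]
        apply List.filter_congr
        intro kv _
        exact pvFilterStep kv.1 ck[j] (ck.drop j) (ck.drop (j + 1)) hdropC hcnotmem
      · intro a ha b hb
        exact hsep1 a ha b (by rw [hdropC]; exact List.mem_cons_of_mem _ hb)
      · intro b hb a ha
        rw [List.take_add_one, List.getElem?_eq_getElem hj'] at hb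
        simp only [List.mem_append, Option.toList_some, List.mem_singleton] at hb
        rcases hb with hb | rfl
        · exact hsep2 b hb a ha
        · exact le_trans (by omega) (hpmin a ha)

theorem pvNodupSortedLt (xs : List Int) (h : xs.Nodup) :
    (PySem.List.sorted xs (fun k => k) false).Pairwise (· < ·) := by
  have h1 : (PySem.List.sorted xs (fun k => k) false).Pairwise (fun a b => a ≤ b) :=
    PySem.List.sorted_pairwise xs (fun k => k)
  have h2 : (PySem.List.sorted xs (fun k => k) false).Nodup :=
    ((PySem.List.sorted_perm xs (fun k => k) false).nodup_iff).mpr h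
  exact (h1.and h2).imp (fun h => lt_of_le_of_ne h.1 h.2)

theorem pvPortA_eq (P C : List (Int × Int)) :
    find_best_db_sorted_dict P C =
      (pvStepA^[P.length] (PySem.Dict.empty, PySem.Dict.mk P, PySem.Dict.mk C)).1.items := by
  unfold find_best_db_sorted_dict
  rw [show (PySem.Dict.empty, PySem.Dict.mk P, PySem.Dict.mk C) =
    ((PySem.Dict.empty : PySem.Dict Int Int), (PySem.Dict.mk P : PySem.Dict Int Int),
      (PySem.Dict.mk C : PySem.Dict Int Int)) from rfl]
  rw [pvFoldlConst, List.length_range]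
  rfl

theorem pvPortB_eq (P C : List (Int × Int)) :
    find_best_db_sorted_dict_alt P C =
      ((pvStepB (PySem.List.sorted ((PySem.Dict.mk P).keys) (fun k => k) false)
        (PySem.List.sorted ((PySem.Dict.mk C).keys) (fun k => k) false) P C)^[P.length]
          (PySem.Dict.empty, 0, 0)).1.items := by
  unfold find_best_db_sorted_dict_alt
  show (List.foldl
      (fun st _ => pvStepB (PySem.List.sorted ((PySem.Dict.mk P).keys) (fun k => k) false)
        (PySem.List.sorted ((PySem.Dict.mk C).keys) (fun k => k) false) P C st)
      (PySem.Dict.empty, 0, 0) (List.range P.length)).1.items = _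
  rw [pvFoldlConst, List.length_range]

-- ===== VERDICT (by name: the statement is the Claim_ definition above) =====
theorem find_best_db_sorted_dict_spec : Claim_equal_find_best_db_sorted_dict := by
  intro P C _ hpre
  obtain ⟨hPnd, hCnd, hdisj⟩ := hpre
  unfold Spec_find_best_db_sorted_dict
  rw [pvPortA_eq, pvPortB_eq]
  have hpperm := PySem.List.sorted_perm (P.map Prod.fst) (fun k => k) false
  have hcperm := PySem.List.sorted_perm (C.map Prod.fst) (fun k => k) false
  refine congrArg PySem.Dict.items
    (pvLoop P C _ _ (pvNodupSortedLt _ hPnd) (pvNodupSortedLt _ hCnd) hpperm hcperm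
      ?_ P.length 0 0 PySem.Dict.empty (PySem.Dict.mk P) (PySem.Dict.mk C)
      (by omega) (Nat.zero_le _) (Nat.zero_le _) ?_ ?_ (by simp) (by simp))
  · intro hne
    cases hdisj with
    | inl h => exact absurd h hne
    | inr h => exact h
  · show P = P.filter _
    rw [eq_comm, List.filter_eq_self]
    intro kv hkv
    simpa using hpperm.mem_iff.mpr (List.mem_map_of_mem hkv)
  · show C = C.filter _
    rw [eq_comm, List.filter_eq_self]
    intro kv hkv
    simpa using hcperm.mem_iff.mpr (List.mem_map_of_mem hkv)

theorem find_best_db_sorted_dict_raises : Claim_raises_find_best_db_sorted_dict := by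
  unfold Claim_raises_find_best_db_sorted_dict
  constructor
  · rintro P C _ ⟨-, -, hne, hb⟩ ⟨-, -, h | h⟩
    · exact hne h
    · exact hb h
  · exact ⟨by decide, by decide, by decide⟩

-- self-check: the crash-fix claim evaluates at the literal raise witness
theorem pvRaiseWitnessOut_ok :
    find_best_db_sorted_dict_alt [(1, 10)] [] = [(1, 10)] :=
  find_best_db_sorted_dict_raises.2.2.2
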